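-- pv_equiv track=rewrite | github.com/aleksandervestlund/algdat | exercises/exercise3/largest_cuboid.py | largest_cuboid
-- ===== SOURCE A (Python) =====
-- def largest_cuboid(x: list[list[int]]) -> int:
--     n = len(x)
--     potential_rectangles: set[tuple[tuple[int, int], tuple[int, int]]] = {
--         ((0, 0), (n - 1, n - 1))
--     }
--     coordinates = [(i, j) for i in range(n) for j in range(n)]
--     coordinates = sorted(coordinates, key=lambda c: x[c[0]][c[1]])
--     max_volume = 0
--
--     for c in coordinates:
--         to_split: list[tuple[tuple[int, int], tuple[int, int]]] = []
--
--         for rectangle in potential_rectangles: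
--             if (
--                 rectangle[0][0] <= c[0] <= rectangle[1][0]
--                 and rectangle[0][1] <= c[1] <= rectangle[1][1]
--             ):
--                 to_split.append(rectangle)
--                 volume = (
--                     (rectangle[1][0] - rectangle[0][0] + 1)
--                     * (rectangle[1][1] - rectangle[0][1] + 1)
--                     * x[c[0]][c[1]]
--                 )
--                 max_volume = max(max_volume, volume)
--
--         for rectangle in to_split:
--             potential_rectangles.remove(rectangle)
--
--             if c[0] > rectangle[0][0]:
--                 rect = (
--                     (rectangle[0][0], rectangle[0][1]),
--                     (c[0] - 1, rectangle[1][1]),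
--                 )
--                 potential_rectangles.add(rect)
--
--             if c[1] > rectangle[0][1]:
--                 rect = (
--                     (rectangle[0][0], rectangle[0][1]),
--                     (rectangle[1][0], c[1] - 1),
--                 )
--                 potential_rectangles.add(rect)
--
--             if c[0] < rectangle[1][0]:
--                 rect = (
--                     (c[0] + 1, rectangle[0][1]),
--                     (rectangle[1][0], rectangle[1][1]),
--                 )
--                 potential_rectangles.add(rect)
--
--             if c[1] < rectangle[1][1]:
--                 rect = (
--                     (rectangle[0][0], c[1] + 1),
--                     (rectangle[1][0], rectangle[1][1]),
--                 )
--                 potential_rectangles.add(rect)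
--
--     return max_volume
-- ===== SOURCE B (Python) =====
-- def _min_in(x: list[list[int]], i1: int, i2: int, j1: int, j2: int) -> int:
--     m = x[i1][j1]
--     for i in range(i1, i2 + 1):
--         for j in range(j1, j2 + 1):
--             if x[i][j] < m:
--                 m = x[i][j]
--     return m
--
--
-- def largest_cuboid(x: list[list[int]]) -> int:
--     n = len(x)
--     best = 0
--     for i1 in range(n):
--         for i2 in range(i1, n):
--             for j1 in range(n):
--                 for j2 in range(j1, n):
--                     best = max(best, (i2 - i1 + 1) * (j2 - j1 + 1) * _min_in(x, i1, i2, j1, j2))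
--     return best
-- ===== Notes on version B (the rewrite author's own statement) =====
-- stated objective: simpler
-- what changed: A sweeps cells in increasing value order while maintaining and splitting a set of candidate rectangles; B directly enumerates every subrectangle, takes the minimum of its cells, and keeps the running maximum of area*minimum starting from 0.
import Mathlib
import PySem

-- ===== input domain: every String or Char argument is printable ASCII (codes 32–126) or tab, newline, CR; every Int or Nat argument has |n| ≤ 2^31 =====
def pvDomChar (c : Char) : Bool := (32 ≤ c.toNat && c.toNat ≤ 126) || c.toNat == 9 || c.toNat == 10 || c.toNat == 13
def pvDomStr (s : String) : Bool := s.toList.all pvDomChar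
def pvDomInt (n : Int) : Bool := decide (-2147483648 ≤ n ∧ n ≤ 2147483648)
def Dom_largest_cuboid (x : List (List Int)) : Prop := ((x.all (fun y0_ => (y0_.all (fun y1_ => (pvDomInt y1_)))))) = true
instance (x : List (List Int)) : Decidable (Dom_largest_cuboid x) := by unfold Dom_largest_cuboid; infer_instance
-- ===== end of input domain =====

-- B replaces A's increasing-value sweep with a maintained, repeatedly split set of candidate
-- rectangles by a plain exhaustive enumeration of all subrectangles (area × minimum, running max
-- from 0): simpler, not faster.

-- ===== PORT A =====
-- x[i][j]; total form with defaults — exact under Pre_ (all indices used are in range there)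
def pvGetX (x : List (List Int)) (i j : Int) : Int :=
  PySem.List.pyGetD (PySem.List.pyGetD x i ([] : List Int)) j 0

def pvContains (R : (Int × Int) × (Int × Int)) (c : Int × Int) : Bool :=
  decide (R.1.1 ≤ c.1 ∧ c.1 ≤ R.2.1 ∧ R.1.2 ≤ c.2 ∧ c.2 ≤ R.2.2)

def pvVol (R : (Int × Int) × (Int × Int)) (v : Int) : Int :=
  (R.2.1 - R.1.1 + 1) * (R.2.2 - R.1.2 + 1) * v

-- the body of A's second inner loop: remove the split rectangle, add up to four pieces
-- (`.remove` never raises here: it is only called on members of the set)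
def pvSplit (P : PySem.Set ((Int × Int) × (Int × Int))) (R : (Int × Int) × (Int × Int))
    (c : Int × Int) : PySem.Set ((Int × Int) × (Int × Int)) :=
  let P1 := (PySem.Set.remove? P R).getD P
  let P2 := if R.1.1 < c.1 then PySem.Set.add P1 ((R.1.1, R.1.2), (c.1 - 1, R.2.2)) else P1
  let P3 := if R.1.2 < c.2 then PySem.Set.add P2 ((R.1.1, R.1.2), (R.2.1, c.2 - 1)) else P2
  let P4 := if c.1 < R.2.1 then PySem.Set.add P3 ((c.1 + 1, R.1.2), (R.2.1, R.2.2)) else P3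
  if c.2 < R.2.2 then PySem.Set.add P4 ((R.1.1, c.2 + 1), (R.2.1, R.2.2)) else P4

-- one iteration of A's outer loop over the sorted coordinates
def pvStepA (x : List (List Int)) (st : PySem.Set ((Int × Int) × (Int × Int)) × Int)
    (c : Int × Int) : PySem.Set ((Int × Int) × (Int × Int)) × Int :=
  let ts := st.1.foldl (fun (acc : List ((Int × Int) × (Int × Int)) × Int) R =>
      if pvContains R c then (acc.1 ++ [R], max acc.2 (pvVol R (pvGetX x c.1 c.2))) else acc)
    ([], st.2)
  (ts.1.foldl (fun P R => pvSplit P R c) st.1, ts.2)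

def largest_cuboid (x : List (List Int)) : Int :=
  let n : Int := PySem.List.len x
  let coordinates : List (Int × Int) :=
    (PySem.List.pyRange 0 n 1).flatMap (fun i => (PySem.List.pyRange 0 n 1).map (fun j => (i, j)))
  let cs := PySem.List.sorted coordinates (fun c => pvGetX x c.1 c.2) false
  (cs.foldl (pvStepA x) (PySem.Set.ofList [((0, 0), (n - 1, n - 1))], 0)).2

-- ===== PORT B =====
-- min of x[i][j] over i1 ≤ i ≤ i2, j1 ≤ j ≤ j2 (Source B's _min_in)
def pvMin (x : List (List Int)) (i1 i2 j1 j2 : Int) : Int :=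
  (PySem.List.pyRange i1 (i2 + 1) 1).foldl (fun m i =>
    (PySem.List.pyRange j1 (j2 + 1) 1).foldl (fun m j =>
      if pvGetX x i j < m then pvGetX x i j else m) m) (pvGetX x i1 j1)

def largest_cuboid_alt (x : List (List Int)) : Int :=
  let n : Int := PySem.List.len x
  (PySem.List.pyRange 0 n 1).foldl (fun best i1 =>
    (PySem.List.pyRange i1 n 1).foldl (fun best i2 =>
      (PySem.List.pyRange 0 n 1).foldl (fun best j1 =>
        (PySem.List.pyRange j1 n 1).foldl (fun best j2 =>
          max best ((i2 - i1 + 1) * (j2 - j1 + 1) * pvMin x i1 i2 j1 j2)) best) best) best) 0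

-- ===== PRECONDITION & SPEC =====
-- Pre_ excludes exactly the ragged inputs with a row shorter than len(x), on which the Python A
-- (and B) raise IndexError while sorting by x[i][j] (resp. reading x[i][j]).
def Pre_largest_cuboid (x : List (List Int)) : Prop := ∀ row ∈ x, x.length ≤ row.length
instance (x : List (List Int)) : Decidable (Pre_largest_cuboid x) := by
  unfold Pre_largest_cuboid; infer_instance

def pvWitness_largest_cuboid : List (List Int) := [[1, -2], [3, 4]]

def Spec_largest_cuboid (x : List (List Int)) (out : Int) : Prop := out = largest_cuboid_alt x
instance (x : List (List Int)) (out : Int) : Decidable (Spec_largest_cuboid x out) := by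
  unfold Spec_largest_cuboid; infer_instance

-- ===== CLAIM (what is proved, stated in full; the proofs are below) =====
def Claim_equal_largest_cuboid : Prop :=
  ∀ (x : List (List Int)), Dom_largest_cuboid x → Pre_largest_cuboid x →
    Spec_largest_cuboid x (largest_cuboid x)

-- ===== LEMMAS AND PROOFS =====

-- value of the cell c, as A's sort key reads it
def pvG (x : List (List Int)) (c : Int × Int) : Int := pvGetX x c.1 c.2

def pvInGrid (n : Int) (c : Int × Int) : Prop := 0 ≤ c.1 ∧ c.1 < n ∧ 0 ≤ c.2 ∧ c.2 < n

def pvValidR (n : Int) (R : (Int × Int) × (Int × Int)) : Prop :=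
  0 ≤ R.1.1 ∧ R.1.1 ≤ R.2.1 ∧ R.2.1 < n ∧ 0 ≤ R.1.2 ∧ R.1.2 ≤ R.2.2 ∧ R.2.2 < n

def pvSubR (R0 R : (Int × Int) × (Int × Int)) : Prop :=
  R.1.1 ≤ R0.1.1 ∧ R0.2.1 ≤ R.2.1 ∧ R.1.2 ≤ R0.1.2 ∧ R0.2.2 ≤ R.2.2

def pvCellsIn (R : (Int × Int) × (Int × Int)) (s : List (Int × Int)) : Prop :=
  ∀ c, pvContains R c = true → c ∈ s

def pvCoverN (n : Int) (P : List ((Int × Int) × (Int × Int))) (s : List (Int × Int)) : Prop :=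
  ∀ R0, pvValidR n R0 → pvCellsIn R0 s → ∃ R ∈ P, pvSubR R0 R

-- all subrectangles B enumerates, in B's order
def pvRects (n : Int) : List ((Int × Int) × (Int × Int)) :=
  (PySem.List.pyRange 0 n 1).flatMap (fun i1 =>
    (PySem.List.pyRange i1 n 1).flatMap (fun i2 =>
      (PySem.List.pyRange 0 n 1).flatMap (fun j1 =>
        (PySem.List.pyRange j1 n 1).map (fun j2 => ((i1, j1), (i2, j2))))))

lemma pv_mem_pvRects (n : Int) (R : (Int × Int) × (Int × Int)) :
    R ∈ pvRects n ↔ pvValidR n R := by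
  obtain ⟨⟨a1, b1⟩, a2, b2⟩ := R
  simp only [pvRects, List.mem_flatMap, List.mem_map, PySem.List.mem_pyRange_one, pvValidR,
    Prod.mk.injEq]
  constructor
  · rintro ⟨i1, h1, i2, h2, j1, h3, j2, h4, ⟨he1, he2⟩, he3, he4⟩
    subst he1; subst he2; subst he3; subst he4; omega
  · rintro h
    exact ⟨a1, by omega, a2, by omega, b1, by omega, b2, by omega, ⟨rfl, rfl⟩, rfl, rfl⟩

lemma pv_alt_eq (x : List (List Int)) :
    largest_cuboid_alt x =
      ((pvRects (PySem.List.len x)).map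
        (fun R => pvVol R (pvMin x R.1.1 R.2.1 R.1.2 R.2.2))).foldl max 0 := by
  simp only [largest_cuboid_alt, pvRects, List.map_flatMap, List.map_map,
    List.foldl_flatMap, List.foldl_map, Function.comp_def, pvVol]

lemma pv_foldl_max_le {t : List Int} {a M : Int} (ha : a ≤ M) (h : ∀ y ∈ t, y ≤ M) :
    t.foldl max a ≤ M := by
  induction t generalizing a with
  | nil => simpa
  | cons y t ih =>
    simp only [List.foldl_cons]
    exact ih (max_le ha (h y (by simp))) (fun z hz => h z (List.mem_cons_of_mem _ hz))

lemma pv_le_foldl_min {t : List Int} {a v : Int} (ha : v ≤ a) (h : ∀ y ∈ t, v ≤ y) :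
    v ≤ t.foldl min a := by
  induction t generalizing a with
  | nil => simpa
  | cons y t ih =>
    simp only [List.foldl_cons]
    exact ih (le_min ha (h y (by simp))) (fun z hz => h z (List.mem_cons_of_mem _ hz))

lemma pv_alt_nonneg (x : List (List Int)) : 0 ≤ largest_cuboid_alt x := by
  rw [pv_alt_eq]
  exact (PySem.List.le_foldl_max _ _).1

lemma pv_alt_ge (x : List (List Int)) (R : (Int × Int) × (Int × Int))
    (h : pvValidR (PySem.List.len x) R) :
    pvVol R (pvMin x R.1.1 R.2.1 R.1.2 R.2.2) ≤ largest_cuboid_alt x := by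
  rw [pv_alt_eq]
  exact (PySem.List.le_foldl_max _ _).2 _
    (List.mem_map_of_mem ((pv_mem_pvRects _ _).mpr h))

lemma pv_alt_le (x : List (List Int)) (M : Int) (h0 : 0 ≤ M)
    (h : ∀ R, pvValidR (PySem.List.len x) R → pvVol R (pvMin x R.1.1 R.2.1 R.1.2 R.2.2) ≤ M) :
    largest_cuboid_alt x ≤ M := by
  rw [pv_alt_eq]
  refine pv_foldl_max_le h0 ?_
  intro y hy
  obtain ⟨R, hR, rfl⟩ := List.mem_map.mp hy
  exact h R ((pv_mem_pvRects _ _).mp hR)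

-- cells of a rectangle as a list (matching pvMin's traversal)
def pvCellsList (R : (Int × Int) × (Int × Int)) : List (Int × Int) :=
  (PySem.List.pyRange R.1.1 (R.2.1 + 1) 1).flatMap (fun i =>
    (PySem.List.pyRange R.1.2 (R.2.2 + 1) 1).map (fun j => (i, j)))

lemma pv_mem_pvCellsList (R : (Int × Int) × (Int × Int)) (c : Int × Int) :
    c ∈ pvCellsList R ↔ pvContains R c = true := by
  obtain ⟨i, j⟩ := c
  simp only [pvCellsList, List.mem_flatMap, List.mem_map, PySem.List.mem_pyRange_one,
    pvContains, Prod.mk.injEq, decide_eq_true_eq]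
  constructor
  · rintro ⟨i', h1, j', h2, he1, he2⟩
    subst he1; subst he2; omega
  · rintro h
    exact ⟨i, by omega, j, by omega, rfl, rfl⟩

lemma pv_pvMin_eq_fold (x : List (List Int)) (i1 i2 j1 j2 : Int) :
    pvMin x i1 i2 j1 j2 =
      ((pvCellsList ((i1, j1), (i2, j2))).map (pvG x)).foldl min (pvG x (i1, j1)) := by
  have hcong : ∀ (i : Int) (m : Int),
      (PySem.List.pyRange j1 (j2 + 1) 1).foldl
        (fun m j => if pvGetX x i j < m then pvGetX x i j else m) m =
      (PySem.List.pyRange j1 (j2 + 1) 1).foldl (fun m j => min m (pvGetX x i j)) m := by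
    intro i m
    refine PySem.List.foldl_congr_mem _ _ _ _ ?_
    intro acc j hj
    dsimp only
    split_ifs <;> omega
  simp only [pvMin, pvCellsList, List.map_flatMap, List.map_map, List.foldl_flatMap,
    List.foldl_map, Function.comp_def, pvG]
  refine PySem.List.foldl_congr_mem _ _ _ _ ?_
  intro acc i hi
  exact hcong i acc

lemma pv_pvMin_eq (x : List (List Int)) (R : (Int × Int) × (Int × Int)) (c : Int × Int)
    (hc : pvContains R c = true)
    (hmin : ∀ d, pvContains R d = true → pvG x c ≤ pvG x d) :
    pvMin x R.1.1 R.2.1 R.1.2 R.2.2 = pvG x c := by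
  rw [pv_pvMin_eq_fold]
  have hR : ((R.1.1, R.1.2), (R.2.1, R.2.2)) = R := by
    simp
  rw [hR]
  have hcorner : pvContains R (R.1.1, R.1.2) = true := by
    simp only [pvContains, decide_eq_true_eq] at hc ⊢
    omega
  refine le_antisymm ?_ ?_
  · exact (PySem.List.foldl_min_le _ _).2 _
      (List.mem_map_of_mem ((pv_mem_pvCellsList _ _).mpr hc))
  · refine pv_le_foldl_min (hmin _ hcorner) ?_
    intro y hy
    obtain ⟨d, hd, rfl⟩ := List.mem_map.mp hy
    exact hmin d ((pv_mem_pvCellsList _ _).mp hd)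

-- A's first inner loop (collect + running max) in closed form
lemma pv_ts_eq (x : List (List Int)) (c : Int × Int)
    (P : List ((Int × Int) × (Int × Int))) (acc0 : List ((Int × Int) × (Int × Int))) (m0 : Int) :
    P.foldl (fun (acc : List ((Int × Int) × (Int × Int)) × Int) R =>
        if pvContains R c then (acc.1 ++ [R], max acc.2 (pvVol R (pvGetX x c.1 c.2))) else acc)
      (acc0, m0)
    = (acc0 ++ P.filter (fun R => pvContains R c),
       ((P.filter (fun R => pvContains R c)).map
          (fun R => pvVol R (pvGetX x c.1 c.2))).foldl max m0) := by
  induction P generalizing acc0 m0 with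
  | nil => simp
  | cons R P ih =>
    simp only [List.foldl_cons, List.filter_cons]
    by_cases hR : pvContains R c = true
    · simp only [hR, if_true, ih, List.map_cons, List.foldl_cons, List.append_assoc,
        List.singleton_append]
    · simp only [hR, if_false, ih, Bool.false_eq_true]

lemma pv_split_mem_keep (P : PySem.Set ((Int × Int) × (Int × Int)))
    (R R' : (Int × Int) × (Int × Int)) (c : Int × Int) (h : R' ∈ P) (hne : R' ≠ R) :
    R' ∈ pvSplit P R c := by
  have h1 : R' ∈ (PySem.Set.remove? P R).getD P := by
    by_cases hm : R ∈ P
    · rw [PySem.Set.remove?_of_mem hm, Option.getD_some, PySem.Set.mem_discard]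
      exact ⟨h, hne⟩
    · rw [(PySem.Set.remove?_eq_none_iff _ _).mpr hm, Option.getD_none]
      exact h
  simp only [pvSplit]
  split_ifs <;> (try simp only [PySem.Set.mem_add]) <;> tauto

lemma pv_split_mem_forward (P : PySem.Set ((Int × Int) × (Int × Int)))
    (R R' : (Int × Int) × (Int × Int)) (c : Int × Int) (h : R' ∈ pvSplit P R c) :
    (R' ∈ P ∧ R' ≠ R) ∨ R' = ((R.1.1, R.1.2), (c.1 - 1, R.2.2)) ∨
      R' = ((R.1.1, R.1.2), (R.2.1, c.2 - 1)) ∨ R' = ((c.1 + 1, R.1.2), (R.2.1, R.2.2)) ∨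
      R' = ((R.1.1, c.2 + 1), (R.2.1, R.2.2)) := by
  have hP1 : ∀ y, y ∈ (PySem.Set.remove? P R).getD P → y ∈ P ∧ y ≠ R := by
    intro y hy
    by_cases hm : R ∈ P
    · rw [PySem.Set.remove?_of_mem hm, Option.getD_some, PySem.Set.mem_discard] at hy
      exact hy
    · rw [(PySem.Set.remove?_eq_none_iff _ _).mpr hm, Option.getD_none] at hy
      exact ⟨hy, fun he => hm (he ▸ hy)⟩
  simp only [pvSplit] at h
  split_ifs at h <;> (try simp only [PySem.Set.mem_add] at h) <;>
    (have hh := fun hy => hP1 R' hy) <;> tauto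

-- a child rectangle produced by a split never contains the split cell, and its cells are cells
-- of the parent
lemma pv_child_cells (R R' : (Int × Int) × (Int × Int)) (c : Int × Int)
    (hRc : pvContains R c = true)
    (hch : R' = ((R.1.1, R.1.2), (c.1 - 1, R.2.2)) ∨ R' = ((R.1.1, R.1.2), (R.2.1, c.2 - 1)) ∨
      R' = ((c.1 + 1, R.1.2), (R.2.1, R.2.2)) ∨ R' = ((R.1.1, c.2 + 1), (R.2.1, R.2.2))) :
    pvContains R' c = false ∧ ∀ d, pvContains R' d = true → pvContains R d = true := by
  simp only [pvContains, decide_eq_true_eq] at hRc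
  rcases hch with rfl | rfl | rfl | rfl <;>
    refine ⟨by simp only [pvContains, decide_eq_false_iff_not]; omega, ?_⟩ <;>
    · intro d hd
      simp only [pvContains, decide_eq_true_eq] at hd ⊢
      omega

lemma pv_split_mem_child1 (P : PySem.Set ((Int × Int) × (Int × Int)))
    (R : (Int × Int) × (Int × Int)) (c : Int × Int) (h : R.1.1 < c.1) :
    ((R.1.1, R.1.2), (c.1 - 1, R.2.2)) ∈ pvSplit P R c := by
  simp only [pvSplit, h, if_true]
  split_ifs <;> simp [PySem.Set.mem_add]

lemma pv_split_mem_child2 (P : PySem.Set ((Int × Int) × (Int × Int)))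
    (R : (Int × Int) × (Int × Int)) (c : Int × Int) (h : R.1.2 < c.2) :
    ((R.1.1, R.1.2), (R.2.1, c.2 - 1)) ∈ pvSplit P R c := by
  simp only [pvSplit, h, if_true]
  split_ifs <;> simp [PySem.Set.mem_add]

lemma pv_split_mem_child3 (P : PySem.Set ((Int × Int) × (Int × Int)))
    (R : (Int × Int) × (Int × Int)) (c : Int × Int) (h : c.1 < R.2.1) :
    ((c.1 + 1, R.1.2), (R.2.1, R.2.2)) ∈ pvSplit P R c := by
  simp only [pvSplit, h, if_true]
  split_ifs <;> simp [PySem.Set.mem_add]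

lemma pv_split_mem_child4 (P : PySem.Set ((Int × Int) × (Int × Int)))
    (R : (Int × Int) × (Int × Int)) (c : Int × Int) (h : c.2 < R.2.2) :
    ((R.1.1, c.2 + 1), (R.2.1, R.2.2)) ∈ pvSplit P R c := by
  simp only [pvSplit, h, if_true]
  split_ifs <;> simp [PySem.Set.mem_add]

lemma pv_split_cover (P : PySem.Set ((Int × Int) × (Int × Int)))
    (R R0 : (Int × Int) × (Int × Int)) (c : Int × Int)
    (hRc : pvContains R c = true) (hsub : pvSubR R0 R) (hnc : pvContains R0 c = false)
    (hprop : R0.1.1 ≤ R0.2.1 ∧ R0.1.2 ≤ R0.2.2) :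
    ∃ R' ∈ pvSplit P R c, pvSubR R0 R' := by
  simp only [pvContains, decide_eq_true_eq] at hRc
  simp only [pvContains, decide_eq_false_iff_not] at hnc
  obtain ⟨hp1, hp2⟩ := hprop
  obtain ⟨hs1, hs2, hs3, hs4⟩ := hsub
  rcases (by omega : R0.2.1 < c.1 ∨ c.1 < R0.1.1 ∨ R0.2.2 < c.2 ∨ c.2 < R0.1.2) with
    hcase | hcase | hcase | hcase
  · exact ⟨_, pv_split_mem_child1 P R c (by omega), by simp only [pvSubR]; simp; omega⟩
  · exact ⟨_, pv_split_mem_child3 P R c (by omega), by simp only [pvSubR]; simp; omega⟩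
  · exact ⟨_, pv_split_mem_child2 P R c (by omega), by simp only [pvSubR]; simp; omega⟩
  · exact ⟨_, pv_split_mem_child4 P R c (by omega), by simp only [pvSubR]; simp; omega⟩

-- the split fold keeps every rectangle's cells inside s' (the unprocessed suffix)
lemma pv_splitFold_cells (c : Int × Int) (s' : List (Int × Int))
    (L : List ((Int × Int) × (Int × Int))) :
    ∀ (P : PySem.Set ((Int × Int) × (Int × Int))),
      (∀ R ∈ L, pvContains R c = true ∧ pvCellsIn R (c :: s')) →
      (∀ R' ∈ P, pvCellsIn R' (c :: s')) →
      (∀ R' ∈ P, pvContains R' c = true → R' ∈ L) →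
      ∀ R' ∈ L.foldl (fun P R => pvSplit P R c) P, pvCellsIn R' s' := by
  induction L with
  | nil =>
    intro P hL hi hii R' hR' d hd
    have hnc : pvContains R' c = false := by
      by_contra h
      exact absurd (hii R' hR' (by simpa using h)) (List.not_mem_nil)
    have hdm : d ∈ c :: s' := hi R' hR' d hd
    rcases List.mem_cons.mp hdm with rfl | hds
    · rw [hd] at hnc; cases hnc
    · exact hds
  | cons R L ih =>
    intro P hL hi hii
    simp only [List.foldl_cons]
    obtain ⟨hRc, hRcells⟩ := hL R (by simp)
    refine ih (pvSplit P R c) (fun R' h => hL R' (by simp [h])) ?_ ?_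
    · intro R' hR'
      rcases pv_split_mem_forward P R R' c hR' with ⟨hP, _⟩ | hch | hch | hch | hch
      · exact hi R' hP
      all_goals
        exact fun d hd =>
          hRcells d ((pv_child_cells R R' c hRc (by tauto)).2 d hd)
    · intro R' hR' hR'c
      rcases pv_split_mem_forward P R R' c hR' with ⟨hP, hne⟩ | hch | hch | hch | hch
      · rcases List.mem_cons.mp (hii R' hP hR'c) with rfl | h
        · exact absurd rfl hne
        · exact h
      all_goals
        rw [(pv_child_cells R R' c hRc (by tauto)).1] at hR'c; cases hR'c

-- the split fold preserves coverage of any rectangle not containing the processed cell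
lemma pv_splitFold_cover (c : Int × Int) (R0 : (Int × Int) × (Int × Int))
    (hnc : pvContains R0 c = false) (hprop : R0.1.1 ≤ R0.2.1 ∧ R0.1.2 ≤ R0.2.2)
    (L : List ((Int × Int) × (Int × Int))) :
    ∀ (P : PySem.Set ((Int × Int) × (Int × Int))),
      (∀ R ∈ L, pvContains R c = true) →
      (∃ R1 ∈ P, pvSubR R0 R1) →
      ∃ R1 ∈ L.foldl (fun P R => pvSplit P R c) P, pvSubR R0 R1 := by
  induction L with
  | nil => intro P _ hex; exact hex
  | cons R L ih =>
    intro P hL hex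
    simp only [List.foldl_cons]
    obtain ⟨R1, hR1, hsub⟩ := hex
    refine ih (pvSplit P R c) (fun R' h => hL R' (by simp [h])) ?_
    by_cases hne : R1 = R
    · subst hne
      exact pv_split_cover P R1 R0 c (hL R1 (by simp)) hsub hnc hprop
    · exact ⟨R1, pv_split_mem_keep P R R1 c hR1 hne, hsub⟩

lemma pv_mono (x : List (List Int)) (s : List (Int × Int)) :
    ∀ st : PySem.Set ((Int × Int) × (Int × Int)) × Int,
      st.2 ≤ (s.foldl (pvStepA x) st).2 := by
  induction s with
  | nil => intro st; simp
  | cons c s ih =>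
    intro st
    simp only [List.foldl_cons]
    refine le_trans ?_ (ih (pvStepA x st c))
    show st.2 ≤ (pvStepA x st c).2
    simp only [pvStepA]
    rw [pv_ts_eq]
    exact (PySem.List.le_foldl_max _ _).1

-- the master invariant: along A's sweep the running maximum stays within [0, B's answer], and
-- by the end it dominates B's candidate for every rectangle whose cells are all unprocessed
lemma pv_master (x : List (List Int)) (s : List (Int × Int)) :
    ∀ st : PySem.Set ((Int × Int) × (Int × Int)) × Int,
      s.Nodup →
      (∀ d ∈ s, pvInGrid (PySem.List.len x) d) →
      List.Pairwise (fun a b => pvG x a ≤ pvG x b) s →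
      (∀ R ∈ st.1, pvCellsIn R s) →
      pvCoverN (PySem.List.len x) st.1 s →
      0 ≤ st.2 → st.2 ≤ largest_cuboid_alt x →
      0 ≤ (s.foldl (pvStepA x) st).2 ∧ (s.foldl (pvStepA x) st).2 ≤ largest_cuboid_alt x ∧
        ∀ R0, pvValidR (PySem.List.len x) R0 → pvCellsIn R0 s →
          pvVol R0 (pvMin x R0.1.1 R0.2.1 R0.1.2 R0.2.2) ≤ (s.foldl (pvStepA x) st).2 := by
  induction s with
  | nil =>
    intro st _ _ _ _ _ hm0 hmalt
    refine ⟨hm0, hmalt, ?_⟩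
    intro R0 hv hcl
    exfalso
    have hcorner : pvContains R0 (R0.1.1, R0.1.2) = true := by
      simp only [pvContains, decide_eq_true_eq]
      obtain ⟨h1, h2, h3, h4, h5, h6⟩ := hv
      omega
    exact absurd (hcl _ hcorner) (List.not_mem_nil)
  | cons c s' ih =>
    intro st hnd hgrid hpair hcells hcover hm0 hmalt
    obtain ⟨hcn, hnd'⟩ := List.nodup_cons.mp hnd
    have hkey : ∀ d ∈ c :: s', pvG x c ≤ pvG x d := by
      intro d hd
      rcases List.mem_cons.mp hd with rfl | hd'
      · exact le_refl _
      · exact (List.pairwise_cons.mp hpair).1 d hd'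
    have hpair' := (List.pairwise_cons.mp hpair).2
    have hgrid' : ∀ d ∈ s', pvInGrid (PySem.List.len x) d := fun d hd => hgrid d (by simp [hd])
    have hstep : pvStepA x st c =
        ((st.1.filter (fun R => pvContains R c)).foldl (fun P R => pvSplit P R c) st.1,
         ((st.1.filter (fun R => pvContains R c)).map
            (fun R => pvVol R (pvGetX x c.1 c.2))).foldl max st.2) := by
      simp only [pvStepA]
      rw [pv_ts_eq]
      simp
    set st' := pvStepA x st c with hst'def
    have h1cells : ∀ R' ∈ st'.1, pvCellsIn R' s' := by
      rw [hstep]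
      refine pv_splitFold_cells c s' _ st.1 ?_ hcells ?_
      · intro R hR
        have hm := List.mem_filter.mp hR
        exact ⟨by simpa using hm.2, hcells R hm.1⟩
      · intro R' h hc'
        exact List.mem_filter.mpr ⟨h, by simpa using hc'⟩
    have hvol_le : ∀ R ∈ st.1, pvContains R c = true → pvVol R (pvGetX x c.1 c.2) ≤ st'.2 := by
      intro R hR hRc
      rw [hstep]
      exact (PySem.List.le_foldl_max _ _).2 _
        (List.mem_map_of_mem (List.mem_filter.mpr ⟨hR, by simpa using hRc⟩))
    have hm'0 : 0 ≤ st'.2 := by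
      rw [hstep]; exact le_trans hm0 (PySem.List.le_foldl_max _ _).1
    have hm'alt : st'.2 ≤ largest_cuboid_alt x := by
      rw [hstep]
      refine pv_foldl_max_le hmalt ?_
      intro y hy
      obtain ⟨R, hRf, rfl⟩ := List.mem_map.mp hy
      obtain ⟨hRmem, hRc'⟩ := List.mem_filter.mp hRf
      have hRc : pvContains R c = true := by simpa using hRc'
      have hcont := hRc
      simp only [pvContains, decide_eq_true_eq] at hcont
      have hcorn1 : pvContains R (R.1.1, R.1.2) = true := by
        simp only [pvContains, decide_eq_true_eq]; omega
      have hcorn2 : pvContains R (R.2.1, R.2.2) = true := by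
        simp only [pvContains, decide_eq_true_eq]; omega
      have hg1 := hgrid _ (hcells R hRmem _ hcorn1)
      have hg2 := hgrid _ (hcells R hRmem _ hcorn2)
      simp only [pvInGrid] at hg1 hg2
      have hvalid : pvValidR (PySem.List.len x) R := by
        simp only [pvValidR]
        omega
      have hminR : pvMin x R.1.1 R.2.1 R.1.2 R.2.2 = pvG x c :=
        pv_pvMin_eq x R c hRc (fun d hd => hkey d (hcells R hRmem d hd))
      have halt := pv_alt_ge x R hvalid
      rw [hminR] at halt
      simpa [pvG] using halt
    have hcover' : pvCoverN (PySem.List.len x) st'.1 s' := by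
      intro R0 hv hcl
      have hnc : pvContains R0 c = false := by
        by_contra h
        exact hcn (hcl c (by simpa using h))
      rw [hstep]
      exact pv_splitFold_cover c R0 hnc ⟨hv.2.1, hv.2.2.2.2.1⟩ _ st.1
        (fun R h => by simpa using (List.mem_filter.mp h).2)
        (hcover R0 hv (fun d hd => List.mem_cons_of_mem _ (hcl d hd)))
    have IH := ih st' hnd' hgrid' hpair' h1cells hcover' hm'0 hm'alt
    rw [List.foldl_cons, ← hst'def]
    refine ⟨IH.1, IH.2.1, ?_⟩
    intro R0 hv hcl
    by_cases hc0 : pvContains R0 c = true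
    · obtain ⟨R, hRmem, hRsub⟩ := hcover R0 hv hcl
      obtain ⟨hs1, hs2, hs3, hs4⟩ := hRsub
      obtain ⟨hv1, hv2, hv3, hv4, hv5, hv6⟩ := hv
      have hRc : pvContains R c = true := by
        simp only [pvContains, decide_eq_true_eq] at hc0 ⊢
        omega
      have hminR0 : pvMin x R0.1.1 R0.2.1 R0.1.2 R0.2.2 = pvG x c :=
        pv_pvMin_eq x R0 c hc0 (fun d hd => hkey d (hcl d hd))
      have hvle := hvol_le R hRmem hRc
      have hmono := pv_mono x s' st'
      rw [hminR0]
      rcases Int.lt_or_le (pvG x c) 0 with hneg | hpos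
      · refine le_trans ?_ IH.1
        simp only [pvVol]
        have hnn : 0 ≤ (R0.2.1 - R0.1.1 + 1) * (R0.2.2 - R0.1.2 + 1) :=
          mul_nonneg (by omega) (by omega)
        exact mul_nonpos_of_nonneg_of_nonpos hnn hneg.le
      · refine le_trans ?_ (le_trans hvle hmono)
        simp only [pvVol, pvG]
        have hw : R0.2.1 - R0.1.1 + 1 ≤ R.2.1 - R.1.1 + 1 := by omega
        have hh : R0.2.2 - R0.1.2 + 1 ≤ R.2.2 - R.1.2 + 1 := by omega
        have hmul : (R0.2.1 - R0.1.1 + 1) * (R0.2.2 - R0.1.2 + 1) ≤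
            (R.2.1 - R.1.1 + 1) * (R.2.2 - R.1.2 + 1) :=
          mul_le_mul hw hh (by omega) (by omega)
        exact mul_le_mul_of_nonneg_right hmul hpos
    · refine IH.2.2 R0 hv ?_
      intro d hd
      rcases List.mem_cons.mp (hcl d hd) with rfl | h
      · exact absurd hd hc0
      · exact h

-- ===== VERDICT (by name: the statement is the Claim_ definition above) =====
theorem largest_cuboid_spec : Claim_equal_largest_cuboid := by
  intro x _ _
  show largest_cuboid x = largest_cuboid_alt x
  set n := PySem.List.len x with hndef
  set coords := (PySem.List.pyRange 0 n 1).flatMap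
      (fun i => (PySem.List.pyRange 0 n 1).map (fun j => (i, j))) with hcoords
  set cs := PySem.List.sorted coords (fun c => pvGetX x c.1 c.2) false with hcs
  have hlc : largest_cuboid x =
      (cs.foldl (pvStepA x) (PySem.Set.ofList [((0, 0), (n - 1, n - 1))], 0)).2 := rfl
  have hmem : ∀ d : Int × Int, d ∈ cs ↔ pvInGrid n d := by
    intro d
    rw [hcs, PySem.List.mem_sorted, hcoords]
    obtain ⟨i, j⟩ := d
    simp only [List.mem_flatMap, List.mem_map, PySem.List.mem_pyRange_one, pvInGrid,
      Prod.mk.injEq]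
    constructor
    · rintro ⟨i', h1, j', h2, rfl, rfl⟩
      omega
    · rintro h
      exact ⟨i, by omega, j, by omega, rfl, rfl⟩
  have hndcoords : coords.Nodup := by
    rw [hcoords]
    refine List.nodup_flatMap.mpr ⟨?_, ?_⟩
    · intro i _
      exact (PySem.List.nodup_pyRange_one _ _).map
        (by intro a b h; simpa using congrArg Prod.snd h)
    · refine (PySem.List.pairwise_lt_pyRange_one 0 n).imp ?_
      intro a b hab z hza hzb
      obtain ⟨j1, _, rfl⟩ := List.mem_map.mp hza
      obtain ⟨j2, _, hz⟩ := List.mem_map.mp hzb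
      have : b = a := congrArg Prod.fst hz
      omega
  have hnodup : cs.Nodup :=
    ((PySem.List.sorted_perm coords _ false).nodup_iff).mpr hndcoords
  have hpair : List.Pairwise (fun a b => pvG x a ≤ pvG x b) cs := by
    rw [hcs]
    exact PySem.List.sorted_pairwise coords _
  have hof : PySem.Set.ofList [(((0 : Int), (0 : Int)), (n - 1, n - 1))] =
      [(((0 : Int), (0 : Int)), (n - 1, n - 1))] := rfl
  have hcells0 : ∀ R ∈ PySem.Set.ofList [(((0 : Int), (0 : Int)), (n - 1, n - 1))],
      pvCellsIn R cs := by
    rw [hof]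
    intro R hR
    rw [List.mem_singleton] at hR
    subst hR
    intro d hd
    simp only [pvContains, decide_eq_true_eq] at hd
    refine (hmem d).mpr ?_
    simp only [pvInGrid]
    omega
  have hcover0 : pvCoverN n (PySem.Set.ofList [(((0 : Int), (0 : Int)), (n - 1, n - 1))]) cs := by
    rw [hof]
    intro R0 hv _
    refine ⟨_, List.mem_singleton_self _, ?_⟩
    obtain ⟨h1, h2, h3, h4, h5, h6⟩ := hv
    simp only [pvSubR]
    omega
  have hmaster := pv_master x cs (PySem.Set.ofList [(((0 : Int), (0 : Int)), (n - 1, n - 1))], 0)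
    hnodup (fun d hd => (hmem d).mp hd) hpair hcells0 hcover0 le_rfl (pv_alt_nonneg x)
  rw [hlc]
  refine le_antisymm hmaster.2.1 ?_
  refine pv_alt_le x _ hmaster.1 ?_
  intro R0 hv
  refine hmaster.2.2 R0 hv ?_
  intro d hd
  simp only [pvContains, decide_eq_true_eq] at hd
  obtain ⟨h1, h2, h3, h4, h5, h6⟩ := hv
  refine (hmem d).mpr ?_
  simp only [pvInGrid]
  omega
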